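-- pv_equiv track=rewrite | github.com/alrichardbollans/mining_trait_data | read_pdfs/parse_wiersema.py | compress_lines_into_names
-- ===== SOURCE A (Python) =====
-- def compress_lines_into_names(all_text_lines):
--     """
--     Takes list of lines in pdf and concatenate those lines which are names spread over multiple lines
--     :param all_text_lines:
--     :return:
--     """
--     new_lines = []
--     iterable = iter(range(len(all_text_lines)))
--     for i in iterable:
--         line = all_text_lines[i]
--         if line == '' or line == ' ':
--             continue
--         elif ' -' in line:
--             new_line = line
--             count = 0
--             for l in range(i + 1, len(all_text_lines)):
--                 next_line = all_text_lines[l]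
--                 if ' -' not in next_line:
--                     new_line += next_line
--                     count += 1
--                 else:
--                     break
--             new_lines.append(new_line)
--             [next(iterable) for x in range(count)]
--         else:
--             new_lines.append(line)
--
--     return new_lines
-- ===== SOURCE B (Python) =====
-- def compress_lines_into_names(all_text_lines):
--     """
--     Takes list of lines in pdf and concatenate those lines which are names spread over multiple lines
--     :param all_text_lines:
--     :return:
--     """
--     new_lines = []
--     current = None
--     for line in all_text_lines:
--         if ' -' in line:
--             if current is not None:
--                 new_lines.append(current)
--             current = line
--         elif current is not None:
--             current += line
--         elif line != '' and line != ' ':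
--             new_lines.append(line)
--     if current is not None:
--         new_lines.append(current)
--     return new_lines
-- ===== Notes on version B (the rewrite author's own statement) =====
-- stated objective: simpler
-- what changed: Replaced the index-based outer loop with an inner forward scan plus iterator-skipping hack by a single flat pass maintaining one running `current` entry that is flushed when the next ' -' line starts.
import Mathlib
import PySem

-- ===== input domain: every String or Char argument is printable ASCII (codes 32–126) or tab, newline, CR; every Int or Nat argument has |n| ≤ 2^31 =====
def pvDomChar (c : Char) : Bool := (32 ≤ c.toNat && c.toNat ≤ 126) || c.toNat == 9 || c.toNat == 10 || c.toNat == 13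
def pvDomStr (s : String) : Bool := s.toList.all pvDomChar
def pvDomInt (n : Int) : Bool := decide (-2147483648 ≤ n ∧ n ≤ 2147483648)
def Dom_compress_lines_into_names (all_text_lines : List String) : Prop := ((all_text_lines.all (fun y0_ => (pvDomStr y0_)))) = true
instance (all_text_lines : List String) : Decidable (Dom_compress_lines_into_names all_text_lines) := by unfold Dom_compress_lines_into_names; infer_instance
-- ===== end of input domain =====

-- B is a simpler single flat pass with one running `current` entry; return values proved equal to A's.

-- ===== PORT A =====
-- inner 'for l in range(i+1, len(...))' loop: absorbs following lines without ' -'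
-- and returns (new_line, remaining suffix where the break happened)
def pvAbsorb (cur : String) : List String → String × List String
  | [] => (cur, [])
  | next :: rest =>
      if PySem.Str.isIn " -" next = false then pvAbsorb (cur ++ next) rest
      else (cur, next :: rest)

theorem pvAbsorb_len (cur : String) (l : List String) :
    (pvAbsorb cur l).2.length ≤ l.length := by
  induction l generalizing cur with
  | nil => simp [pvAbsorb]
  | cons next rest ih =>
      simp only [pvAbsorb]
      split
      · exact Nat.le_succ_of_le (ih _)
      · simp

-- outer loop: the 'next(iterable)' skip advances past exactly the absorbed lines,
-- i.e. the loop resumes at the suffix returned by pvAbsorb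
def compress_lines_into_names (all_text_lines : List String) : List String :=
  match all_text_lines with
  | [] => []
  | line :: rest =>
      if line = "" || line = " " then compress_lines_into_names rest
      else if PySem.Str.isIn " -" line then
        let p := pvAbsorb line rest
        p.1 :: compress_lines_into_names p.2
      else line :: compress_lines_into_names rest
termination_by all_text_lines.length
decreasing_by
  · simp
  · exact Nat.lt_succ_of_le (pvAbsorb_len _ _)
  · simp

-- ===== PORT B =====
def pvStepB (st : List String × Option String) (line : String) : List String × Option String :=
  if PySem.Str.isIn " -" line then
    match st.2 with
    | some c => (st.1 ++ [c], some line)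
    | none => (st.1, some line)
  else
    match st.2 with
    | some c => (st.1, some (c ++ line))
    | none => if line ≠ "" ∧ line ≠ " " then (st.1 ++ [line], none) else st

def pvFlush (st : List String × Option String) : List String :=
  match st.2 with
  | some c => st.1 ++ [c]
  | none => st.1

def compress_lines_into_names_alt (all_text_lines : List String) : List String :=
  pvFlush (all_text_lines.foldl pvStepB ([], none))

-- ===== PRECONDITION & SPEC =====
def Spec_compress_lines_into_names (all_text_lines : List String) (out : List String) : Prop := out = compress_lines_into_names_alt all_text_lines
instance (all_text_lines : List String) (out : List String) : Decidable (Spec_compress_lines_into_names all_text_lines out) := by unfold Spec_compress_lines_into_names; infer_instance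

-- ===== CLAIM (what is proved, stated in full; the proofs are below) =====
def Claim_equal_compress_lines_into_names : Prop := ∀ (all_text_lines : List String), Dom_compress_lines_into_names all_text_lines → Spec_compress_lines_into_names all_text_lines (compress_lines_into_names all_text_lines)

-- ===== LEMMAS AND PROOFS =====

theorem pvA_cons (line : String) (rest : List String) :
    compress_lines_into_names (line :: rest) =
      if line = "" || line = " " then compress_lines_into_names rest
      else if PySem.Str.isIn " -" line then
        (pvAbsorb line rest).1 :: compress_lines_into_names (pvAbsorb line rest).2
      else line :: compress_lines_into_names rest := by
  rw [compress_lines_into_names.eq_def]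

-- a line containing ' -' is neither '' nor ' '
theorem pvDash_ne (line : String) (h : PySem.Str.isIn " -" line = true) :
    (decide (line = "") || decide (line = " ")) = false := by
  have h1 : line ≠ "" := by rintro rfl; revert h; decide
  have h2 : line ≠ " " := by rintro rfl; revert h; decide
  simp [h1, h2]

-- B's fold with a pending entry equals A's inner absorption followed by A's outer loop
theorem pvFold_some (l : List String) (cur : String) (res : List String) :
    pvFlush (l.foldl pvStepB (res, some cur)) =
      res ++ (pvAbsorb cur l).1 :: compress_lines_into_names (pvAbsorb cur l).2 := by
  induction l generalizing cur res with
  | nil => simp [pvAbsorb, pvFlush, compress_lines_into_names]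
  | cons line rest ih =>
      by_cases hd : PySem.Str.isIn " -" line = true
      · have hne := pvDash_ne line hd
        have hnf : ¬ (PySem.Str.isIn " -" line = false) := by intro h; rw [hd] at h; cases h
        have habs : pvAbsorb cur (line :: rest) = (cur, line :: rest) := by
          simp only [pvAbsorb]; rw [if_neg hnf]
        simp only [List.foldl_cons, pvStepB, hd, if_true]
        rw [ih, habs, pvA_cons]
        simp only [hne, Bool.false_eq_true, if_false, hd, if_true]
        simp
      · have hf : PySem.Str.isIn " -" line = false := by
          cases h : PySem.Str.isIn " -" line <;> simp_all
        have habs : pvAbsorb cur (line :: rest) = pvAbsorb (cur ++ line) rest := by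
          simp only [pvAbsorb]; rw [if_pos hf]
        simp only [List.foldl_cons, pvStepB, hf, Bool.false_eq_true, if_false]
        rw [ih, habs]

-- B's fold with no pending entry equals A's outer loop
theorem pvFold_none (l : List String) (res : List String) :
    pvFlush (l.foldl pvStepB (res, none)) = res ++ compress_lines_into_names l := by
  induction l generalizing res with
  | nil => simp [pvFlush, compress_lines_into_names]
  | cons line rest ih =>
      by_cases hd : PySem.Str.isIn " -" line = true
      · have hne := pvDash_ne line hd
        simp only [List.foldl_cons, pvStepB, hd, if_true]
        rw [pvFold_some, pvA_cons]
        simp only [hne, Bool.false_eq_true, if_false, hd, if_true]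
      · have hf : PySem.Str.isIn " -" line = false := by
          cases h : PySem.Str.isIn " -" line <;> simp_all
        by_cases hb : line = "" ∨ line = " "
        · have ht : (decide (line = "") || decide (line = " ")) = true := by
            rcases hb with h | h <;> simp [h]
          simp only [List.foldl_cons, pvStepB, hf, Bool.false_eq_true, if_false]
          rw [if_neg (by tauto), ih, pvA_cons]
          simp only [ht, if_true]
        · have hb' : line ≠ "" ∧ line ≠ " " := by tauto
          have h1 : (decide (line = "") || decide (line = " ")) = false := by
            simp [hb'.1, hb'.2]
          simp only [List.foldl_cons, pvStepB, hf, Bool.false_eq_true, if_false]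
          rw [if_pos hb', ih, pvA_cons]
          simp only [h1, Bool.false_eq_true, if_false, hf]
          simp

-- ===== VERDICT (by name: the statement is the Claim_ definition above) =====
theorem compress_lines_into_names_spec : Claim_equal_compress_lines_into_names := by
  intro l _
  unfold Spec_compress_lines_into_names compress_lines_into_names_alt
  rw [pvFold_none]
  simp
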